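-- pv_equiv track=rewrite | github.com/seanrjohnson/protein_gibbs_sampler | src/pgen/models.py | rawbatchlen
-- ===== SOURCE A (Python) =====
-- def rawbatchlen(raw_batch: str):
--     count = 0
--     counting = True
--     for ch in raw_batch:
--         if ch == "<":
--             counting = False
--         if ch == ">":
--             counting = True
--         if counting == True:
--             count += 1
--     return count
-- ===== SOURCE B (Python) =====
-- import re
--
-- def rawbatchlen(raw_batch: str):
--     return len(re.sub(r'<[^>]*', '', raw_batch))
-- ===== Notes on version B (the rewrite author's own statement) =====
-- stated objective: simpler
-- what changed: Replaced the manual character-by-character state-machine loop with a one-line regex substitution that deletes each '<' together with the following run of non-'>' characters and returns the length of what remains.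
import Mathlib
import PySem

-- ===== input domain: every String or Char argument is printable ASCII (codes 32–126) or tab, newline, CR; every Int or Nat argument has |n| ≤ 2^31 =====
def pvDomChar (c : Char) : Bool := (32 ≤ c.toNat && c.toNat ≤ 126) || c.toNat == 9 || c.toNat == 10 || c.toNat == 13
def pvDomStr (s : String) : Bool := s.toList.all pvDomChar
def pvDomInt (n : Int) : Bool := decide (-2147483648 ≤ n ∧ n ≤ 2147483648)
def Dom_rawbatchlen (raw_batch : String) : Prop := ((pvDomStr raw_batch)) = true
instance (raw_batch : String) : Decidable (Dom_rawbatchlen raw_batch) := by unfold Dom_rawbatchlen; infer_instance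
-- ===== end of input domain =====

-- B replaces A's explicit counting-flag loop by a regex substitution deleting '<'-to-before-'>' blocks and taking the remaining length (objective: simpler).

-- ===== PORT A =====
-- literal transliteration of A's for-loop: state (count, counting), branches in source order
def pvStepA (st : Int × Bool) (ch : Char) : Int × Bool :=
  let counting := if ch = '<' then false else st.2
  let counting := if ch = '>' then true else counting
  (if counting then st.1 + 1 else st.1, counting)

def rawbatchlen (raw_batch : String) : Int :=
  (raw_batch.toList.foldl pvStepA (0, true)).1

-- ===== PORT B =====
-- hand port of re.sub(r'<[^>]*', '', s): exact — the regex engine deletes, at each '<',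
-- that '<' and the maximal following run of non-'>' characters, and leaves all other characters.
def pvStrip : List Char → List Char
  | [] => []
  | c :: rest =>
    if c = '<' then pvStrip (rest.dropWhile (· ≠ '>'))
    else c :: pvStrip rest
termination_by cs => cs.length
decreasing_by
  · simpa using Nat.lt_succ_of_le (List.length_dropWhile_le (· ≠ '>') rest)
  · simp

def rawbatchlen_alt (raw_batch : String) : Int :=
  (pvStrip raw_batch.toList).length

-- ===== PRECONDITION & SPEC =====
def Spec_rawbatchlen (raw_batch : String) (out : Int) : Prop := out = rawbatchlen_alt raw_batch
instance (raw_batch : String) (out : Int) : Decidable (Spec_rawbatchlen raw_batch out) := by unfold Spec_rawbatchlen; infer_instance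

-- ===== CLAIM (what is proved, stated in full; the proofs are below) =====
def Claim_equal_rawbatchlen : Prop := ∀ (raw_batch : String), Dom_rawbatchlen raw_batch → Spec_rawbatchlen raw_batch (rawbatchlen raw_batch)

-- ===== LEMMAS AND PROOFS =====

theorem pvStepA_lt (st : Int × Bool) : pvStepA st '<' = (st.1, false) := by
  simp [pvStepA]

theorem pvStepA_gt (st : Int × Bool) : pvStepA st '>' = (st.1 + 1, true) := by
  simp [pvStepA]

theorem pvStepA_other (st : Int × Bool) (c : Char) (h1 : ¬ c = '<') (h2 : ¬ c = '>') :
    pvStepA st c = (if st.2 then st.1 + 1 else st.1, st.2) := by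
  simp [pvStepA, h1, h2]

-- the fold invariant: from state (count, b) the final count is count plus the stripped length
-- of the remaining input (with the pending uncounted run dropped when b = false)
theorem pvFold_invariant (cs : List Char) :
    ∀ (count : Int) (b : Bool),
      (cs.foldl pvStepA (count, b)).1
      = count + ((pvStrip (if b then cs else cs.dropWhile (· ≠ '>'))).length : Int) := by
  induction cs with
  | nil =>
    intro count b
    cases b <;> simp [pvStrip]
  | cons c rest ih =>
    intro count b
    rw [List.foldl_cons]
    by_cases hlt : c = '<'
    · subst hlt
      rw [pvStepA_lt, ih]
      cases b
      · have hne : ¬ ('<' = '>') := by decide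
        simp [hne]
      · simp [pvStrip]
    · by_cases hgt : c = '>'
      · subst hgt
        rw [pvStepA_gt, ih]
        cases b
        · simp [pvStrip]
          omega
        · simp [pvStrip, hlt]
          omega
      · rw [pvStepA_other _ _ hlt hgt, ih]
        cases b
        · simp [hgt]
        · simp [pvStrip, hlt]
          omega

-- ===== VERDICT (by name: the statement is the Claim_ definition above) =====
theorem rawbatchlen_spec : Claim_equal_rawbatchlen := by
  intro s _
  unfold Spec_rawbatchlen rawbatchlen rawbatchlen_alt
  simpa using pvFold_invariant s.toList 0 true
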